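-- pv_equiv track=rewrite | github.com/constantinpape/torch-em | torch_em/segmentation.py | samples_to_datasets
-- ===== SOURCE A (Python) =====
-- def samples_to_datasets(n_samples, raw_paths, raw_key, split="uniform"):
--     """@private
--     """
--     assert split in ("balanced", "uniform")
--     n_datasets = len(raw_paths)
--     if split == "uniform":
--         # even distribution of samples to datasets
--         samples_per_ds = n_samples // n_datasets
--         divider = n_samples % n_datasets
--         return [samples_per_ds + 1 if ii < divider else samples_per_ds for ii in range(n_datasets)]
--     else:
--         # distribution of samples to dataset based on the dataset lens
--         raise NotImplementedError
-- ===== SOURCE B (Python) =====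
-- def samples_to_datasets(n_samples, raw_paths, raw_key, split="uniform"):
--     """@private
--     """
--     assert split in ("balanced", "uniform")
--     n_datasets = len(raw_paths)
--     if split == "uniform":
--         # running-remainder distribution: each dataset takes the ceiling share of what is left
--         out = []
--         remaining = n_samples
--         for ii in range(n_datasets):
--             take = -(-remaining // (n_datasets - ii))
--             out.append(take)
--             remaining -= take
--         return out
--     else:
--         # distribution of samples to dataset based on the dataset lens
--         raise NotImplementedError
-- ===== Notes on version B (the rewrite author's own statement) =====
-- stated objective: alternative
-- what changed: Replaces the closed-form quotient/remainder comprehension by a single running-remainder pass that gives each dataset the ceiling share of the samples still left.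
import Mathlib
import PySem

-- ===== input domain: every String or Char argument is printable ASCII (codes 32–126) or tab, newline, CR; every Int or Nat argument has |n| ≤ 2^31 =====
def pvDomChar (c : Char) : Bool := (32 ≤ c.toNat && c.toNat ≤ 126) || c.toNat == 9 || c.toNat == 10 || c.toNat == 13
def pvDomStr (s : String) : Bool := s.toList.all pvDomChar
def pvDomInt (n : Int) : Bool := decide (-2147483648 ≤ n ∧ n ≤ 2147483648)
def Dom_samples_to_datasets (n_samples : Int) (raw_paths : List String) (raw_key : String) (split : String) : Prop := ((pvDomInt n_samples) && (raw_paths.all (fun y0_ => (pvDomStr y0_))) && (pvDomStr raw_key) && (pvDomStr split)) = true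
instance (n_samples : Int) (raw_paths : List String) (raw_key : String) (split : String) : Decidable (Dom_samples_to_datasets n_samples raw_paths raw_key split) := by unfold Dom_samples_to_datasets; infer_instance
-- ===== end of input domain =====

-- B replaces A's closed-form quotient/remainder comprehension by a running-remainder
-- pass taking the ceiling share of what is left at each step (objective: alternative).

-- ===== PORT A =====
-- assert/NotImplementedError branches raise in Python; those inputs are excluded by Pre_ (port returns []).
def samples_to_datasets (n_samples : Int) (raw_paths : List String) (raw_key : String) (split : String) : List Int :=
  let n_datasets : Int := raw_paths.length
  if split == "uniform" then
    let samples_per_ds := PySem.Int.floordiv n_samples n_datasets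
    let divider := PySem.Int.mod n_samples n_datasets
    (PySem.List.pyRange 0 n_datasets 1).map
      (fun ii => if ii < divider then samples_per_ds + 1 else samples_per_ds)
  else []

-- ===== PORT B =====
-- the loop of Source B, recursing on the number of datasets still to serve (n_datasets - ii)
def samplesAltLoop (remaining : Int) (k : Nat) : List Int :=
  match k with
  | 0 => []
  | k' + 1 =>
    let take := -(PySem.Int.floordiv (-remaining) ((k' + 1 : Nat) : Int))
    take :: samplesAltLoop (remaining - take) k'

def samples_to_datasets_alt (n_samples : Int) (raw_paths : List String) (raw_key : String) (split : String) : List Int :=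
  if split == "uniform" then samplesAltLoop n_samples raw_paths.length
  else []

-- ===== PRECONDITION & SPEC =====
-- Pre_ excludes inputs where Python A raises: split not "uniform" (assert failure or
-- NotImplementedError) and empty raw_paths (ZeroDivisionError).
def Pre_samples_to_datasets (n_samples : Int) (raw_paths : List String) (raw_key : String) (split : String) : Prop :=
  split = "uniform" ∧ raw_paths ≠ []
instance (n_samples : Int) (raw_paths : List String) (raw_key : String) (split : String) : Decidable (Pre_samples_to_datasets n_samples raw_paths raw_key split) := by unfold Pre_samples_to_datasets; infer_instance

def pvWitness_samples_to_datasets : Int × List String × String × String := (7, ["a", "b", "c"], "k", "uniform")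

def Spec_samples_to_datasets (n_samples : Int) (raw_paths : List String) (raw_key : String) (split : String) (out : List Int) : Prop := out = samples_to_datasets_alt n_samples raw_paths raw_key split
instance (n_samples : Int) (raw_paths : List String) (raw_key : String) (split : String) (out : List Int) : Decidable (Spec_samples_to_datasets n_samples raw_paths raw_key split out) := by unfold Spec_samples_to_datasets; infer_instance

-- ===== CLAIM (what is proved, stated in full; the proofs are below) =====
def Claim_equal_samples_to_datasets : Prop := ∀ (n_samples : Int) (raw_paths : List String) (raw_key : String) (split : String), Dom_samples_to_datasets n_samples raw_paths raw_key split → Pre_samples_to_datasets n_samples raw_paths raw_key split → Spec_samples_to_datasets n_samples raw_paths raw_key split (samples_to_datasets n_samples raw_paths raw_key split)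

-- ===== LEMMAS AND PROOFS =====

-- The running-ceiling loop equals A's closed-form distribution, for every remaining m and count k.
lemma samplesAltLoop_eq (k : Nat) (m : Int) :
    samplesAltLoop m k =
      (PySem.List.pyRange 0 (k : Int) 1).map
        (fun ii => if ii < PySem.Int.mod m (k : Int) then PySem.Int.floordiv m (k : Int) + 1
                   else PySem.Int.floordiv m (k : Int)) := by
  induction k generalizing m with
  | zero => simp [samplesAltLoop, PySem.List.pyRange_one_eq_nil]
  | succ k ih =>
    have hkpos : (0 : Int) < ((k + 1 : Nat) : Int) := by positivity
    set K : Int := ((k + 1 : Nat) : Int) with hK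
    have hK1 : K = (k : Int) + 1 := by rw [hK]; push_cast; ring
    set q : Int := PySem.Int.floordiv m K with hq
    set r : Int := PySem.Int.mod m K with hr
    have hsum : q * ((k : Int) + 1) + r = m := by rw [← hK1]; exact PySem.Int.floordiv_mul_add_mod m K
    have hr0 : 0 ≤ r := PySem.Int.mod_nonneg _ hkpos
    have hrlt : r < K := PySem.Int.mod_lt _ hkpos
    have hrlt' : r < (k : Int) + 1 := hK1 ▸ hrlt
    have htake : -(PySem.Int.floordiv (-m) K) = q + (if r = 0 then 0 else 1) := by
      rw [PySem.Int.neg_floordiv_neg_eq_iff_of_pos hkpos, hK1]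
      split_ifs with h0
      · constructor <;> nlinarith
      · have hrpos : 0 < r := by omega
        constructor <;> nlinarith
    show -(PySem.Int.floordiv (-m) K) ::
        samplesAltLoop (m - -(PySem.Int.floordiv (-m) K)) k = _
    rw [htake, ih]
    rw [hK1, PySem.List.pyRange_one_cons (by omega : (0:Int) < (k:Int) + 1)]
    rcases Nat.eq_zero_or_pos k with hk0 | hkpos'
    · subst hk0
      have hr00 : r = 0 := by
        simp only [Nat.cast_zero] at hrlt'
        omega
      rw [PySem.List.pyRange_one_eq_nil (by omega : ((0:Nat) : Int) ≤ 0)]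
      rw [PySem.List.pyRange_one_eq_nil (by omega : (((0:Nat) : Int) + 1) ≤ 0 + 1)]
      simp [hr00]
    · have hkposI : (0 : Int) < (k : Int) := by exact_mod_cast hkpos'
      have hm' : m - (q + (if r = 0 then 0 else 1)) = q * (k : Int) + (r - (if r = 0 then 0 else 1)) := by
        split_ifs with h0 <;> nlinarith
      have hr'b : 0 ≤ r - (if r = 0 then 0 else 1) ∧ r - (if r = 0 then 0 else 1) < (k : Int) := by
        constructor <;> (split_ifs <;> omega)
      have hfd : PySem.Int.floordiv (m - (q + (if r = 0 then 0 else 1))) (k : Int) = q := by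
        rw [PySem.Int.floordiv_eq_iff_of_pos hkposI, hm']
        constructor <;> nlinarith [hr'b.1, hr'b.2]
      have hmod : PySem.Int.mod (m - (q + (if r = 0 then 0 else 1))) (k : Int)
          = r - (if r = 0 then 0 else 1) := by
        have h := PySem.Int.floordiv_mul_add_mod (m - (q + (if r = 0 then 0 else 1))) (k : Int)
        rw [hfd] at h
        linarith [hm']
      rw [hfd, hmod]
      rw [List.map_cons]
      congr 1
      · split_ifs <;> omega
      · rw [PySem.List.pyRange_one (0+1) ((k:Int)+1), PySem.List.pyRange_one 0 (k:Int)]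
        have hlen : (((k:Int) + 1) - (0+1)).toNat = ((k:Int) - 0).toNat := by omega
        rw [hlen, List.map_map, List.map_map]
        apply List.map_congr_left
        intro j hj
        simp only [Function.comp]
        have hcond : ((0:Int) + (j:Int) < r - (if r = 0 then 0 else 1)) ↔ ((1:Int) + (j:Int) < r) := by
          split_ifs <;> omega
        split_ifs <;> omega

-- ===== VERDICT (by name: the statement is the Claim_ definition above) =====
theorem samples_to_datasets_spec : Claim_equal_samples_to_datasets := by
  intro n_samples raw_paths raw_key split _ hpre
  obtain ⟨hu, _⟩ := hpre
  unfold Spec_samples_to_datasets samples_to_datasets samples_to_datasets_alt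
  subst hu
  simp only [beq_self_eq_true, if_true]
  exact (samplesAltLoop_eq raw_paths.length n_samples).symm
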